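-- pv_equiv track=rewrite | github.com/whyj107/CodeWar | 20221212_Last digit symmetry.py | solve
-- ===== SOURCE A (Python) =====
-- def solve(a, b):
--     cnt = 0
--     back = ['00', '01', '25', '76']
--     primes = ['11', '13', '17', '19', '23', '29', '31', '37', '41', '43', '47',
--               '53', '59', '61', '67', '71', '73', '79', '83', '89', '97']
--     for n in range(max(a, 1176), b):
--         n1 = str(n)
--         if n1[-2:] in back:
--             n2 = str(n ** 2)
--             if n1[-2:] == n2[-2:]:
--                 if n1[:2] in primes and n2[:2] in primes:
--                     cnt += 1
--     return cnt
-- ===== SOURCE B (Python) =====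
-- def solve(a, b):
--     primes = (11, 13, 17, 19, 23, 29, 31, 37, 41, 43, 47,
--               53, 59, 61, 67, 71, 73, 79, 83, 89, 97)
--
--     def lead2(m):
--         while m >= 100:
--             m //= 10
--         return m
--
--     lo = max(a, 1176)
--     cnt = 0
--     for r in (0, 1, 25, 76):
--         n = lo + (r - lo) % 100
--         while n < b:
--             if lead2(n) in primes and lead2(n * n) in primes:
--                 cnt += 1
--             n += 100
--     return cnt
-- ===== Notes on version B (the rewrite author's own statement) =====
-- stated objective: faster
-- what changed: B drops all string work: instead of scanning every n in [max(a,1176), b) and slicing str(n)/str(n**2), it walks only the four arithmetic progressions n ≡ 0, 1, 25, 76 (mod 100) (the only residues whose square keeps the last two digits) with step-100 while-loops, and tests the leading-pair-prime conditions numerically by peeling digits with integer division against an integer prime table.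
import Mathlib
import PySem

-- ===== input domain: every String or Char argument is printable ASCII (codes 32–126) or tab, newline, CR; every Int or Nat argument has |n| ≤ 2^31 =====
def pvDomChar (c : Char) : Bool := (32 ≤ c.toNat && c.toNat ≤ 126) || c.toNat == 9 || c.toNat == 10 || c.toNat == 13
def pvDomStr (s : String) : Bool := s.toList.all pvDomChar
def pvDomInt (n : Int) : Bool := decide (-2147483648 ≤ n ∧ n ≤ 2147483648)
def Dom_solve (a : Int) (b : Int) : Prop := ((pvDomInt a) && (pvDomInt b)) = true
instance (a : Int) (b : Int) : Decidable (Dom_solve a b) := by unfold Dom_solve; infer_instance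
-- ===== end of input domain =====

-- B replaces A's per-n scan with string slicing by step-100 while-loops over the four residues
-- n ≡ 0, 1, 25, 76 (mod 100) and purely numeric leading-two-digit extraction; measurably faster by a constant factor.

-- ===== PORT A =====
def solve (a : Int) (b : Int) : Int :=
  let back : List String := ["00", "01", "25", "76"]
  let primes : List String := ["11", "13", "17", "19", "23", "29", "31", "37", "41", "43", "47",
                               "53", "59", "61", "67", "71", "73", "79", "83", "89", "97"]
  (PySem.List.pyRange (max a 1176) b 1).foldl
    (fun cnt n =>
      let n1 := PySem.Int.toStr n
      if back.contains (PySem.Str.slice n1 (some (-2)) none) then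
        let n2 := PySem.Int.toStr (n ^ 2)
        if PySem.Str.slice n1 (some (-2)) none == PySem.Str.slice n2 (some (-2)) none then
          if primes.contains (PySem.Str.slice n1 none (some 2)) &&
             primes.contains (PySem.Str.slice n2 none (some 2)) then cnt + 1
          else cnt
        else cnt
      else cnt) 0

-- ===== PORT B =====
-- B's integer prime table (Python tuple 'primes')
def pvAltPrimes : List Int := [11, 13, 17, 19, 23, 29, 31, 37, 41, 43, 47,
                               53, 59, 61, 67, 71, 73, 79, 83, 89, 97]

-- B's helper lead2: 'while m >= 100: m //= 10'
def pvAltLead2 (m : Int) : Int :=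
  if _h : 100 ≤ m then pvAltLead2 (PySem.Int.floordiv m 10) else m
termination_by m.toNat
decreasing_by
  rw [PySem.Int.floordiv_eq_ediv_of_pos (by norm_num : (0 : Int) < 10)]
  omega

-- B's inner 'while n < b: … n += 100' loop
def pvAltLoop (n : Int) (b : Int) (cnt : Int) : Int :=
  if _h : n < b then
    pvAltLoop (n + 100) b
      (if pvAltPrimes.contains (pvAltLead2 n) && pvAltPrimes.contains (pvAltLead2 (n * n))
       then cnt + 1 else cnt)
  else cnt
termination_by (b - n).toNat
decreasing_by omega

def solve_alt (a : Int) (b : Int) : Int :=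
  let lo := max a 1176
  ([0, 1, 25, 76] : List Int).foldl
    (fun cnt r => pvAltLoop (lo + PySem.Int.mod (r - lo) 100) b cnt) 0

-- ===== PRECONDITION & SPEC =====
def Spec_solve (a : Int) (b : Int) (out : Int) : Prop := out = solve_alt a b
instance (a : Int) (b : Int) (out : Int) : Decidable (Spec_solve a b out) := by unfold Spec_solve; infer_instance

-- ===== CLAIM (what is proved, stated in full; the proofs are below) =====
def Claim_equal_solve : Prop := ∀ (a : Int) (b : Int), Dom_solve a b → Spec_solve a b (solve a b)

-- ===== LEMMAS AND PROOFS =====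

-- proof-only abbreviations
def pvPrimes : List String := ["11", "13", "17", "19", "23", "29", "31", "37", "41", "43", "47",
                               "53", "59", "61", "67", "71", "73", "79", "83", "89", "97"]
def pvLast2 (n : Int) : String := PySem.Str.slice (PySem.Int.toStr n) (some (-2)) none
def pvQ (n : Int) : Bool :=
  pvPrimes.contains (PySem.Str.slice (PySem.Int.toStr n) none (some 2)) &&
  pvPrimes.contains (PySem.Str.slice (PySem.Int.toStr (n * n)) none (some 2))
def pvHit (n : Int) : Bool :=
  pvAltPrimes.contains (pvAltLead2 n) && pvAltPrimes.contains (pvAltLead2 (n * n))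
def pvR (n : Int) : Bool := (n % 100 == 0) || ((n % 100 == 1) || ((n % 100 == 25) || (n % 100 == 76)))
def pvLead2N (k : Nat) : Nat :=
  if h : 100 ≤ k then pvLead2N (k / 10) else k
termination_by k
decreasing_by omega

-- Nat.toDigitsCore with enough fuel is Nat.toDigits with the accumulator appended
lemma pv_tdc_eq : ∀ (n : Nat), ∀ (f : Nat) (ds : List Char), n < f →
    Nat.toDigitsCore 10 f n ds = Nat.toDigits 10 n ++ ds := by
  intro n
  induction n using Nat.strong_induction_on with
  | _ n ih =>
    intro f ds hf
    obtain ⟨f', rfl⟩ : ∃ f', f = f' + 1 := ⟨f - 1, by omega⟩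
    by_cases h0 : n / 10 = 0
    · simp [Nat.toDigitsCore, Nat.toDigits, h0]
    · have hn10 : n / 10 < n := Nat.div_lt_self (by omega) (by omega)
      rw [show Nat.toDigitsCore 10 (f' + 1) n ds
            = Nat.toDigitsCore 10 f' (n / 10) (Nat.digitChar (n % 10) :: ds) from by
          simp [Nat.toDigitsCore, h0]]
      rw [ih (n / 10) hn10 f' _ (by omega)]
      rw [show Nat.toDigits 10 n = Nat.toDigits 10 (n / 10) ++ [Nat.digitChar (n % 10)] from by
          rw [Nat.toDigits]
          rw [show Nat.toDigitsCore 10 (n + 1) n []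
                = Nat.toDigitsCore 10 n (n / 10) [Nat.digitChar (n % 10)] from by
              simp [Nat.toDigitsCore, h0]]
          exact ih (n / 10) hn10 n _ (by omega)]
      simp

-- peeling the last decimal digit
lemma pv_toDigits_split (m : Nat) (h : 10 ≤ m) :
    Nat.toDigits 10 m = Nat.toDigits 10 (m / 10) ++ [Nat.digitChar (m % 10)] := by
  have h0 : ¬ (m / 10 = 0) := by omega
  rw [Nat.toDigits]
  rw [show Nat.toDigitsCore 10 (m + 1) m []
        = Nat.toDigitsCore 10 m (m / 10) [Nat.digitChar (m % 10)] from by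
      simp [Nat.toDigitsCore, h0]]
  exact pv_tdc_eq (m / 10) m _ (by omega)

lemma pv_toDigits_small (m : Nat) (h : m < 10) :
    Nat.toDigits 10 m = [Nat.digitChar m] := by
  have h0 : m / 10 = 0 := by omega
  have h1 : m % 10 = m := by omega
  simp [Nat.toDigits, Nat.toDigitsCore, h0, h1]

lemma pv_toDigits_len : ∀ (m : Nat), 1 ≤ (Nat.toDigits 10 m).length := by
  intro m
  by_cases h : 10 ≤ m
  · rw [pv_toDigits_split m h]; simp
  · rw [pv_toDigits_small m (by omega)]; simp

-- last two characters of str(k) for k ≥ 100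
lemma pv_last2_chars (k : Nat) (h : 100 ≤ k) :
    (pvLast2 (k : Int)).toList = [Nat.digitChar (k % 100 / 10), Nat.digitChar (k % 100 % 10)] := by
  have hsplit : PySem.Int.toChars (k : Int)
      = Nat.toDigits 10 (k / 100) ++ [Nat.digitChar (k / 10 % 10), Nat.digitChar (k % 10)] := by
    unfold PySem.Int.toChars
    rw [if_neg (by omega)]
    rw [show ((k : Int)).toNat = k from by simp]
    rw [pv_toDigits_split k (by omega), pv_toDigits_split (k / 10) (by omega)]
    rw [Nat.div_div_eq_div_mul]
    simp
  unfold pvLast2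
  simp only [PySem.Str.slice]
  rw [PySem.Int.toList_toStr, hsplit]
  rw [show (PySem.Chars.slice
        (Nat.toDigits 10 (k / 100) ++ [Nat.digitChar (k / 10 % 10), Nat.digitChar (k % 10)])
        (some (-2)) none)
      = PySem.List.slice
        (Nat.toDigits 10 (k / 100) ++ [Nat.digitChar (k / 10 % 10), Nat.digitChar (k % 10)])
        (some (-2)) none from rfl]
  rw [PySem.List.slice_from_neg_ofNat _ 2 (by norm_num)]
  rw [show (Nat.toDigits 10 (k / 100) ++ [Nat.digitChar (k / 10 % 10), Nat.digitChar (k % 10)]).length - 2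
        = (Nat.toDigits 10 (k / 100)).length from by simp]
  rw [List.drop_left]
  rw [show k / 10 % 10 = k % 100 / 10 from by omega, show k % 10 = k % 100 % 10 from by omega]
  simp

-- first two characters of str(k) for k ≥ 10 are the digits of pvLead2N k
lemma pv_lead2N_bounds : ∀ (k : Nat), 10 ≤ k → 10 ≤ pvLead2N k ∧ pvLead2N k < 100 := by
  intro k
  induction k using Nat.strong_induction_on with
  | _ k ih =>
    intro hk
    by_cases h : 100 ≤ k
    · rw [pvLead2N, dif_pos h]
      exact ih (k / 10) (by omega) (by omega)
    · rw [pvLead2N, dif_neg h]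
      omega

lemma pv_take2 : ∀ (k : Nat), 10 ≤ k →
    (Nat.toDigits 10 k).take 2
      = [Nat.digitChar (pvLead2N k / 10), Nat.digitChar (pvLead2N k % 10)] := by
  intro k
  induction k using Nat.strong_induction_on with
  | _ k ih =>
    intro hk
    by_cases h : 100 ≤ k
    · have hlen : 2 ≤ (Nat.toDigits 10 (k / 10)).length := by
        rw [pv_toDigits_split (k / 10) (by omega)]
        have := pv_toDigits_len (k / 10 / 10)
        simp; omega
      have hrec : pvLead2N k = pvLead2N (k / 10) := by rw [pvLead2N, dif_pos h]
      rw [pv_toDigits_split k (by omega), List.take_append_of_le_length hlen, hrec]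
      exact ih (k / 10) (by omega) (by omega)
    · rw [pv_toDigits_split k (by omega), pv_toDigits_small (k / 10) (by omega)]
      rw [pvLead2N, dif_neg h]
      simp

-- pvAltLead2 on a nonnegative input is pvLead2N
lemma pv_lead2_cast : ∀ (k : Nat), pvAltLead2 (k : Int) = (pvLead2N k : Int) := by
  intro k
  induction k using Nat.strong_induction_on with
  | _ k ih =>
    by_cases h : 100 ≤ k
    · rw [pvAltLead2, dif_pos (by exact_mod_cast h), pvLead2N, dif_pos h]
      rw [PySem.Int.floordiv_eq_ediv_of_pos (by norm_num : (0 : Int) < 10)]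
      rw [show ((k : Int) / 10) = ((k / 10 : Nat) : Int) from by omega]
      exact ih (k / 10) (by omega)
    · rw [pvAltLead2, pvLead2N, dif_neg (show ¬ (100 : Int) ≤ (k : Int) from by exact_mod_cast h), dif_neg h]

-- two-digit membership: string table vs integer table
lemma pv_memBridge : ∀ p : Nat, p < 100 → 10 ≤ p →
    pvPrimes.contains (String.ofList [Nat.digitChar (p / 10), Nat.digitChar (p % 10)])
      = pvAltPrimes.contains ((p : Nat) : Int) := by decide

-- the string prime test equals B's numeric prime test, for k ≥ 10
lemma pv_prefix_prime (k : Nat) (hk : 10 ≤ k) :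
    pvPrimes.contains (PySem.Str.slice (PySem.Int.toStr (k : Int)) none (some 2))
      = pvAltPrimes.contains (pvAltLead2 (k : Int)) := by
  have hchars : (PySem.Str.slice (PySem.Int.toStr (k : Int)) none (some 2)).toList
      = [Nat.digitChar (pvLead2N k / 10), Nat.digitChar (pvLead2N k % 10)] := by
    simp only [PySem.Str.slice]
    rw [show (PySem.Chars.slice (PySem.Int.toStr (k : Int)).toList none (some 2))
          = PySem.List.slice (PySem.Int.toStr (k : Int)).toList none (some 2) from rfl]
    rw [PySem.List.slice_to _ (by norm_num : (0 : Int) ≤ 2)]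
    rw [PySem.Int.toList_toStr]
    rw [show PySem.Int.toChars (k : Int) = Nat.toDigits 10 k from by
      unfold PySem.Int.toChars
      rw [if_neg (by omega)]
      simp]
    rw [show ((2 : Int)).toNat = 2 from rfl]
    simp [pv_take2 k hk]
  have hs : PySem.Str.slice (PySem.Int.toStr (k : Int)) none (some 2)
      = String.ofList [Nat.digitChar (pvLead2N k / 10), Nat.digitChar (pvLead2N k % 10)] := by
    apply String.ext; rw [hchars]; simp
  obtain ⟨h10, h100⟩ := pv_lead2N_bounds k hk
  rw [hs, pv_memBridge (pvLead2N k) h100 h10, pv_lead2_cast k]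

-- for n ≥ 100 the string pair test pvQ is B's numeric pvHit
lemma pv_Q_eq_hit (n : Int) (h : (100 : Int) ≤ n) : pvQ n = pvHit n := by
  obtain ⟨m, rfl⟩ : ∃ m : Nat, n = (m : Int) := ⟨n.toNat, (Int.toNat_of_nonneg (by omega)).symm⟩
  have hm : 100 ≤ m := by omega
  have hcast : ((m : Int) * (m : Int)) = ((m * m : Nat) : Int) := by push_cast; ring
  unfold pvQ pvHit
  rw [hcast]
  rw [pv_prefix_prime m (by omega),
      pv_prefix_prime (m * m) (le_trans (by omega) (Nat.le_mul_of_pos_left m (by omega)))]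

lemma pv_backMem : ∀ c : Nat, c < 100 →
    ((["00", "01", "25", "76"] : List String).contains
        (String.ofList [Nat.digitChar (c / 10), Nat.digitChar (c % 10)])
      = ((c == 0) || ((c == 1) || ((c == 25) || (c == 76))))) := by decide

lemma pv_sqIdem : ∀ c : Nat, c < 100 →
    ((c == 0) || ((c == 1) || ((c == 25) || (c == 76)))) = true → c * c % 100 = c := by decide

-- the per-element collapse of A's tests for n ≥ 1176
lemma pv_perN (n : Int) (h : (1176 : Int) ≤ n) :
    ((["00", "01", "25", "76"] : List String).contains (pvLast2 n) &&
      ((pvLast2 n == pvLast2 (n * n)) && pvQ n)) = (pvR n && pvQ n) := by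
  obtain ⟨m, rfl⟩ : ∃ m : Nat, n = (m : Int) := ⟨n.toNat, (Int.toNat_of_nonneg (by omega)).symm⟩
  have hm : 100 ≤ m := by omega
  have hmm : 100 ≤ m * m := le_trans hm (Nat.le_mul_of_pos_left m (by omega))
  have h1 : (pvLast2 (m : Int)).toList = [Nat.digitChar (m % 100 / 10), Nat.digitChar (m % 100 % 10)] :=
    pv_last2_chars m hm
  have hcast : ((m : Int) * (m : Int)) = ((m * m : Nat) : Int) := by push_cast; ring
  have h2 : (pvLast2 ((m : Int) * (m : Int))).toList
      = [Nat.digitChar (m * m % 100 / 10), Nat.digitChar (m * m % 100 % 10)] := by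
    rw [hcast]; exact pv_last2_chars (m * m) hmm
  have hs1 : pvLast2 (m : Int) = String.ofList [Nat.digitChar (m % 100 / 10), Nat.digitChar (m % 100 % 10)] := by
    apply String.ext; rw [h1]; simp
  have hc : m % 100 < 100 := Nat.mod_lt _ (by norm_num)
  have hmem := pv_backMem (m % 100) hc
  have hRcast : pvR (m : Int)
      = ((m % 100 == 0) || ((m % 100 == 1) || ((m % 100 == 25) || (m % 100 == 76)))) := by
    unfold pvR
    rw [Bool.eq_iff_iff]
    simp only [Bool.or_eq_true, beq_iff_eq]
    omega
  cases hR : ((m % 100 == 0) || ((m % 100 == 1) || ((m % 100 == 25) || (m % 100 == 76)))) with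
  | true =>
    have hsq : m * m % 100 = m % 100 := by
      rw [Nat.mul_mod]; exact pv_sqIdem (m % 100) hc hR
    have hs2 : pvLast2 ((m : Int) * (m : Int))
        = String.ofList [Nat.digitChar (m % 100 / 10), Nat.digitChar (m % 100 % 10)] := by
      apply String.ext; rw [h2, hsq]; simp
    rw [hs1, hs2, hmem, hRcast, hR]
    simp
  | false =>
    rw [hs1, hmem, hRcast, hR]
    simp

-- step-100 range: nil and cons forms
lemma pv_pyRange100_nil (x b : Int) (h : b ≤ x) : PySem.List.pyRange x b 100 = [] := by
  rw [PySem.List.pyRange_of_pos x b (by norm_num : (0 : Int) < 100)]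
  rw [if_neg (by omega)]
  simp

lemma pv_pyRange100_cons (x b : Int) (h : x < b) :
    PySem.List.pyRange x b 100 = x :: PySem.List.pyRange (x + 100) b 100 := by
  rw [PySem.List.pyRange_of_pos x b (by norm_num : (0 : Int) < 100),
      PySem.List.pyRange_of_pos (x + 100) b (by norm_num : (0 : Int) < 100)]
  rw [if_pos h]
  have hN : ((b - x + 100 - 1) / 100).toNat
      = (if x + 100 < b then ((b - (x + 100) + 100 - 1) / 100).toNat else 0) + 1 := by
    split <;> omega
  rw [hN, List.range_succ_eq_map]
  simp only [List.map_cons, List.map_map, Nat.cast_zero, mul_zero, add_zero]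
  congr 1
  apply List.map_congr_left
  intro c _
  simp only [Function.comp_apply, Nat.succ_eq_add_one]
  push_cast
  ring

-- B's while-loop counts pvHit over the step-100 range
lemma pv_altLoop_eq : ∀ (k : Nat) (n b cnt : Int), (b - n).toNat ≤ k →
    pvAltLoop n b cnt = cnt + ((PySem.List.pyRange n b 100).countP pvHit : Int) := by
  intro k
  induction k with
  | zero =>
    intro n b cnt hk
    rw [pvAltLoop, dif_neg (by omega), pv_pyRange100_nil _ _ (by omega)]
    simp
  | succ k ih =>
    intro n b cnt hk
    by_cases h : n < b
    · rw [pvAltLoop, dif_pos h, ih _ _ _ (by omega), pv_pyRange100_cons _ _ h, List.countP_cons]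
      simp only [pvHit]
      split_ifs <;> push_cast <;> ring
    · rw [pvAltLoop, dif_neg h, pv_pyRange100_nil _ _ (by omega)]
      simp

-- filtering a unit range to a residue class mod 100 is an arithmetic progression
lemma pv_filterAP (r : Int) (hr0 : 0 ≤ r) (hr : r < 100) :
    ∀ (k : Nat) (lo b : Int), (b - lo).toNat ≤ k →
      (PySem.List.pyRange lo b 1).filter (fun n => n % 100 == r)
        = PySem.List.pyRange (lo + (r - lo) % 100) b 100 := by
  intro k
  induction k with
  | zero =>
    intro lo b hk
    rw [PySem.List.pyRange_one_eq_nil (by omega)]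
    rw [pv_pyRange100_nil _ _ (by omega)]
    rfl
  | succ k ih =>
    intro lo b hk
    by_cases hlb : lo < b
    · rw [PySem.List.pyRange_one_cons hlb, List.filter_cons]
      by_cases hmod : lo % 100 = r
      · have hz : (r - lo) % 100 = 0 := by omega
        rw [if_pos (by simp [hmod])]
        rw [ih (lo + 1) b (by omega)]
        have h99 : (r - (lo + 1)) % 100 = 99 := by omega
        rw [h99, hz]
        rw [show lo + 1 + 99 = lo + 100 from by ring, show lo + (0 : Int) = lo from by ring,
            pv_pyRange100_cons lo b hlb]
      · have hz : (r - lo) % 100 ≠ 0 := by omega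
        rw [if_neg (by simp [hmod])]
        rw [ih (lo + 1) b (by omega)]
        congr 1
        omega
    · rw [PySem.List.pyRange_one_eq_nil (by omega)]
      rw [pv_pyRange100_nil _ _ (by omega)]
      rfl

lemma pv_countP_or {α : Type} (p q : α → Bool) (l : List α)
    (h : ∀ x ∈ l, ¬(p x = true ∧ q x = true)) :
    l.countP (fun x => p x || q x) = l.countP p + l.countP q := by
  induction l with
  | nil => simp
  | cons x l ih =>
    have hx := h x (by simp)
    rw [List.countP_cons, List.countP_cons, List.countP_cons,
        ih (fun y hy => h y (by simp [hy]))]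
    cases hp : p x <;> cases hq : q x <;> simp [hp, hq] at hx ⊢ <;> omega

lemma pv_bool_dist (a b c d q : Bool) :
    ((a || (b || (c || d))) && q) = ((a && q) || ((b && q) || ((c && q) || (d && q)))) := by
  cases a <;> cases b <;> cases c <;> cases d <;> cases q <;> rfl

-- A as a count over the unit range
lemma pv_A_eq (a b : Int) : solve a b =
    ((PySem.List.pyRange (max a 1176) b 1).countP
      (fun n => (["00", "01", "25", "76"] : List String).contains (pvLast2 n) &&
        ((pvLast2 n == pvLast2 (n * n)) && pvQ n)) : Int) := by
  have hb : (fun (cnt : Int) (n : Int) =>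
      if (["00", "01", "25", "76"] : List String).contains
           (PySem.Str.slice (PySem.Int.toStr n) (some (-2)) none) then
        if PySem.Str.slice (PySem.Int.toStr n) (some (-2)) none
             == PySem.Str.slice (PySem.Int.toStr (n ^ 2)) (some (-2)) none then
          if (["11", "13", "17", "19", "23", "29", "31", "37", "41", "43", "47",
               "53", "59", "61", "67", "71", "73", "79", "83", "89", "97"] : List String).contains
                (PySem.Str.slice (PySem.Int.toStr n) none (some 2)) &&
             (["11", "13", "17", "19", "23", "29", "31", "37", "41", "43", "47",
               "53", "59", "61", "67", "71", "73", "79", "83", "89", "97"] : List String).contains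
                (PySem.Str.slice (PySem.Int.toStr (n ^ 2)) none (some 2)) then cnt + 1
          else cnt
        else cnt
      else cnt)
      = (fun cnt n =>
          if ((["00", "01", "25", "76"] : List String).contains (pvLast2 n) &&
              ((pvLast2 n == pvLast2 (n * n)) && pvQ n)) then cnt + 1 else cnt) := by
    funext cnt n
    simp only [pvLast2, pvQ, pvPrimes, pow_two]
    split_ifs <;> simp_all
  show (PySem.List.pyRange (max a 1176) b 1).foldl
      (fun (cnt : Int) (n : Int) =>
        if (["00", "01", "25", "76"] : List String).contains
             (PySem.Str.slice (PySem.Int.toStr n) (some (-2)) none) then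
          if PySem.Str.slice (PySem.Int.toStr n) (some (-2)) none
               == PySem.Str.slice (PySem.Int.toStr (n ^ 2)) (some (-2)) none then
            if (["11", "13", "17", "19", "23", "29", "31", "37", "41", "43", "47",
                 "53", "59", "61", "67", "71", "73", "79", "83", "89", "97"] : List String).contains
                  (PySem.Str.slice (PySem.Int.toStr n) none (some 2)) &&
               (["11", "13", "17", "19", "23", "29", "31", "37", "41", "43", "47",
                 "53", "59", "61", "67", "71", "73", "79", "83", "89", "97"] : List String).contains
                  (PySem.Str.slice (PySem.Int.toStr (n ^ 2)) none (some 2)) then cnt + 1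
            else cnt
          else cnt
        else cnt) 0 = _
  rw [hb, PySem.List.foldl_if_add_one]
  simp

-- B as four counts over step-100 ranges
lemma pv_B_eq (a b : Int) : solve_alt a b =
    ((((0 : Int)
      + ((PySem.List.pyRange ((max a 1176) + ((0 : Int) - max a 1176) % 100) b 100).countP pvHit : Int))
      + ((PySem.List.pyRange ((max a 1176) + ((1 : Int) - max a 1176) % 100) b 100).countP pvHit : Int))
      + ((PySem.List.pyRange ((max a 1176) + ((25 : Int) - max a 1176) % 100) b 100).countP pvHit : Int))
      + ((PySem.List.pyRange ((max a 1176) + ((76 : Int) - max a 1176) % 100) b 100).countP pvHit : Int) := by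
  show ([0, 1, 25, 76] : List Int).foldl
      (fun cnt r => pvAltLoop ((max a 1176) + PySem.Int.mod (r - max a 1176) 100) b cnt) 0 = _
  simp only [List.foldl_cons, List.foldl_nil]
  simp only [PySem.Int.mod_eq_emod_of_pos (by norm_num : (0 : Int) < 100)]
  rw [pv_altLoop_eq (b - ((max a 1176) + ((0 : Int) - max a 1176) % 100)).toNat _ _ _ le_rfl]
  rw [pv_altLoop_eq (b - ((max a 1176) + ((1 : Int) - max a 1176) % 100)).toNat _ _ _ le_rfl]
  rw [pv_altLoop_eq (b - ((max a 1176) + ((25 : Int) - max a 1176) % 100)).toNat _ _ _ le_rfl]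
  rw [pv_altLoop_eq (b - ((max a 1176) + ((76 : Int) - max a 1176) % 100)).toNat _ _ _ le_rfl]

-- ===== VERDICT (by name: the statement is the Claim_ definition above) =====
theorem solve_spec : Claim_equal_solve := by
  intro a b _
  show solve a b = solve_alt a b
  rw [pv_A_eq, pv_B_eq]
  have hlo1176 : (1176 : Int) ≤ max a 1176 := le_max_right a 1176
  have hcong : (PySem.List.pyRange (max a 1176) b 1).countP
      (fun n => (["00", "01", "25", "76"] : List String).contains (pvLast2 n) &&
        ((pvLast2 n == pvLast2 (n * n)) && pvQ n))
      = (PySem.List.pyRange (max a 1176) b 1).countP (fun n => pvR n && pvQ n) := by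
    apply List.countP_congr
    intro x hx
    have hxlo : max a 1176 ≤ x := ((PySem.List.mem_pyRange_one).mp hx).1
    rw [pv_perN x (by omega)]
  rw [hcong]
  have hdist : (fun (n : Int) => pvR n && pvQ n)
      = (fun n => ((n % 100 == 0) && pvQ n) ||
          (((n % 100 == 1) && pvQ n) || (((n % 100 == 25) && pvQ n) || ((n % 100 == 76) && pvQ n)))) := by
    funext n
    unfold pvR
    exact pv_bool_dist _ _ _ _ _
  rw [hdist]
  rw [pv_countP_or _ _ _ (by
      intro x hx ⟨hA, hB⟩
      simp only [Bool.and_eq_true, Bool.or_eq_true, beq_iff_eq] at hA hB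
      omega)]
  rw [pv_countP_or _ _ _ (by
      intro x hx ⟨hA, hB⟩
      simp only [Bool.and_eq_true, Bool.or_eq_true, beq_iff_eq] at hA hB
      omega)]
  rw [pv_countP_or _ _ _ (by
      intro x hx ⟨hA, hB⟩
      simp only [Bool.and_eq_true, Bool.or_eq_true, beq_iff_eq] at hA hB
      omega)]
  have hclass : ∀ r : Int, 0 ≤ r → r < 100 →
      (PySem.List.pyRange (max a 1176) b 1).countP (fun n => (n % 100 == r) && pvQ n)
        = (PySem.List.pyRange ((max a 1176) + (r - max a 1176) % 100) b 100).countP pvHit := by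
    intro r h0 h1
    have hcomm : (fun (n : Int) => (n % 100 == r) && pvQ n)
        = (fun n => pvQ n && (n % 100 == r)) := by
      funext n; exact Bool.and_comm _ _
    rw [hcomm, ← List.countP_filter,
        pv_filterAP r h0 h1 (b - max a 1176).toNat (max a 1176) b le_rfl]
    apply List.countP_congr
    intro x hx
    have hxlo : (max a 1176) + (r - max a 1176) % 100 ≤ x :=
      ((PySem.List.mem_pyRange_iff_of_pos (by norm_num : (0 : Int) < 100) x).mp hx).1
    have hmod : (0 : Int) ≤ (r - max a 1176) % 100 := Int.emod_nonneg _ (by norm_num)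
    rw [pv_Q_eq_hit x (by omega)]
  rw [hclass 0 (by norm_num) (by norm_num), hclass 1 (by norm_num) (by norm_num),
      hclass 25 (by norm_num) (by norm_num), hclass 76 (by norm_num) (by norm_num)]
  push_cast
  ring
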